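-- pv_equiv track=rewrite | github.com/hitriee/problem_solving | baekjoon/S1/14426_접두사_찾기.py | need_increase
-- ===== SOURCE A (Python) =====
-- def need_increase(word, words, N):
--     start, end = 0, N - 1
--     while start <= end:
--         mid = (start + end) // 2
--         mid_word = words[mid]
--         if word < mid_word:
--             for i in range(len(word)):
--                 if word[i] != mid_word[i]:
--                     if word[i] < mid_word[i]:
--                         end = mid - 1
--                     else:
--                         start = mid + 1
--                     break
--             else:
--                 return True
--         elif word > mid_word:
--             start = mid + 1
--         else:
--             return True
--     return False
-- ===== SOURCE B (Python) =====
-- def need_increase(word, words, N):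
--     for i in range(N):
--         if words[i].startswith(word):
--             return True
--     return False
-- ===== Notes on version B (the rewrite author's own statement) =====
-- stated objective: simpler
-- what changed: A binary-searches the sorted prefix of the list with a hand-written loop that interleaves a character-by-character prefix comparison into the ordering test; B abandons search entirely and does one exhaustive linear scan of the first N words with a single startswith test per word (correct regardless of probe order, trading O(log N) probes for O(N)).
-- outside the precondition, e.g. on need_increase('a', ['b', 'a'], 2): A returns False, B returns True; on need_increase('a', ['a'], 2): A returns True, B returns True
import Mathlib
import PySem

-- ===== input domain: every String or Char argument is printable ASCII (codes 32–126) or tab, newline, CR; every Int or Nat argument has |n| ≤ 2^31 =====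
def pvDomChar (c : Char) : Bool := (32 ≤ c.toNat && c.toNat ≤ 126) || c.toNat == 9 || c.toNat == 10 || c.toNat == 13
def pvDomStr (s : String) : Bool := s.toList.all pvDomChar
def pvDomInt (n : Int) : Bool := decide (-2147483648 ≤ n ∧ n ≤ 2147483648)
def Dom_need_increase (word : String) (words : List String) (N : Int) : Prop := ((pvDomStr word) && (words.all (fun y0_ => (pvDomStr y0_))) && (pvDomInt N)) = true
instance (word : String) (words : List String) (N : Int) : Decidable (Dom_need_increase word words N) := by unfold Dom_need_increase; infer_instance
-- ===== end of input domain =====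

-- B replaces A's hand-rolled binary search (with interleaved prefix comparison) by a plain
-- exhaustive linear scan of the first N words with one startswith test per word: simpler.


-- ===== PORT A =====
-- A's inner `for i in range(len(word))`: scan both strings in step; at the first differing
-- position return `some (word[i] < mid_word[i])`; `none` = loop completed (for..else => True).
-- (The `_ :: _, []` case is Python's IndexError on a too-short mid_word; it is unreachable in A
-- because the scan runs only under `word < mid_word`, which forces a difference before mw ends.)
def pvInnerScan : List Char → List Char → Option Bool
  | [], _ => none
  | _ :: _, [] => none
  | c :: w', d :: mw' => if c ≠ d then some (decide (c < d)) else pvInnerScan w' mw'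

-- A's `while start <= end` loop; fuel only makes the recursion structural (N+1 is always enough).
def needLoop (word : String) (words : List String) : Nat → Int → Int → Bool
  | 0, _, _ => false
  | fuel + 1, start, e =>
    if start ≤ e then
      let mid := PySem.Int.floordiv (start + e) 2
      match PySem.List.pyGet? words mid with
      | none => false   -- words[mid] raises IndexError in Python; excluded by Pre_
      | some mid_word =>
        if word < mid_word then
          match pvInnerScan word.toList mid_word.toList with
          | some true => needLoop word words fuel start (mid - 1)
          | some false => needLoop word words fuel (mid + 1) e
          | none => true
        else if mid_word < word then needLoop word words fuel (mid + 1) e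
        else true
    else false

def need_increase (word : String) (words : List String) (N : Int) : Bool :=
  needLoop word words (N.toNat + 1) 0 (N - 1)

-- ===== PORT B =====
-- Source B's `for i in range(N): if words[i].startswith(word): return True` / `return False`.
def altLoop (word : String) (words : List String) : List Int → Bool
  | [] => false
  | i :: rest =>
    match PySem.List.pyGet? words i with
    | none => false   -- words[i] raises IndexError in Python; excluded by Pre_
    | some w => if PySem.Str.startswith w word then true else altLoop word words rest

def need_increase_alt (word : String) (words : List String) (N : Int) : Bool :=
  altLoop word words (PySem.List.pyRange 0 N 1)

-- ===== PRECONDITION & SPEC =====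
-- Pre_ excludes N > len(words), where A (and B) can hit an IndexError, and inputs whose first N
-- words are not sorted ascending, where a binary search's answer is an accident of probe order
-- (the function is specified only for a sorted list; see cites for excluded examples).
def Pre_need_increase (word : String) (words : List String) (N : Int) : Prop :=
  N ≤ (words.length : Int) ∧ (words.take N.toNat).Pairwise (fun a b => a.toList ≤ b.toList)
instance (word : String) (words : List String) (N : Int) : Decidable (Pre_need_increase word words N) := by unfold Pre_need_increase; infer_instance

def pvWitness_need_increase : String × List String × Int := ("a", ["ab", "b"], 2)

def Spec_need_increase (word : String) (words : List String) (N : Int) (out : Bool) : Prop := out = need_increase_alt word words N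
instance (word : String) (words : List String) (N : Int) (out : Bool) : Decidable (Spec_need_increase word words N out) := by unfold Spec_need_increase; infer_instance

-- ===== CLAIM (what is proved, stated in full; the proofs are below) =====
def Claim_equal_need_increase : Prop := ∀ (word : String) (words : List String) (N : Int), Dom_need_increase word words N → Pre_need_increase word words N → Spec_need_increase word words N (need_increase word words N)

-- ===== LEMMAS AND PROOFS =====

-- a prefix is ≤ in Python's (lexicographic) string order
theorem pvPrefix_le {w z : List Char} (h : w <+: z) : w ≤ z := by
  obtain ⟨t, rfl⟩ := h
  cases t with
  | nil => simp
  | cons c t' =>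
    apply le_of_lt
    show List.Lex (· < ·) w (w ++ c :: t')
    induction w with
    | nil => exact List.Lex.nil
    | cons a w ih => exact List.Lex.cons ih

-- lists agreeing up to the first differing character compare by that character
theorem pvLex_firstdiff (u a b : List Char) {c d : Char} (h : c < d) :
    (u ++ c :: a) < (u ++ d :: b) := by
  show List.Lex (· < ·) (u ++ c :: a) (u ++ d :: b)
  induction u with
  | nil => exact List.Lex.rel h
  | cons x u ih => exact List.Lex.cons ih

theorem pvInnerScan_none : ∀ w mw : List Char, pvInnerScan w mw = none → w <+: mw ∨ mw <+: w := by
  intro w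
  induction w with
  | nil => intro mw _; exact Or.inl (List.nil_prefix)
  | cons c w' ih =>
    intro mw h
    cases mw with
    | nil => exact Or.inr (List.nil_prefix)
    | cons d mw' =>
      simp only [pvInnerScan] at h
      by_cases hcd : c = d
      · subst hcd
        simp at h
        rcases ih mw' h with h' | h'
        · exact Or.inl (List.cons_prefix_cons.mpr ⟨rfl, h'⟩)
        · exact Or.inr (List.cons_prefix_cons.mpr ⟨rfl, h'⟩)
      · simp [hcd] at h

theorem pvInnerScan_some : ∀ (w mw : List Char) (b : Bool), pvInnerScan w mw = some b →
    ∃ (u a e : List Char) (c d : Char), w = u ++ c :: a ∧ mw = u ++ d :: e ∧ c ≠ d ∧ b = decide (c < d) := by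
  intro w
  induction w with
  | nil => intro mw b h; simp [pvInnerScan] at h
  | cons c w' ih =>
    intro mw b h
    cases mw with
    | nil => simp [pvInnerScan] at h
    | cons d mw' =>
      simp only [pvInnerScan] at h
      by_cases hcd : c = d
      · subst hcd
        simp at h
        obtain ⟨u, a, e, c', d', hw, hmw, hne, hb⟩ := ih mw' b h
        exact ⟨c :: u, a, e, c', d', by simp [hw], by simp [hmw], hne, hb⟩
      · simp [hcd] at h
        exact ⟨[], w', mw', c, d, rfl, rfl, hcd, h.symm⟩

theorem pvSorted_le {ws : List String} (hs : ws.Pairwise (· ≤ ·)) {i j : Nat}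
    (hij : i ≤ j) (hj : j < ws.length) : ws[i]'(lt_of_le_of_lt hij hj) ≤ ws[j] := by
  rcases lt_or_eq_of_le hij with h | h
  · exact List.pairwise_iff_getElem.mp hs i j _ hj h
  · subst h; exact le_refl _

-- A's loop computes "some word among the first N has `word` as a prefix"
theorem pvLoopA (word : String) (words : List String) (N : Int)
    (hn : N.toNat ≤ words.length)
    (hs : (words.take N.toNat).Pairwise (· ≤ ·)) :
    ∀ (fuel : Nat) (start e : Int), 0 ≤ start → e < (N.toNat : Int) →
    (e + 1 - start).toNat < fuel →
    (∀ j : Nat, (hj : j < N.toNat) →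
        word.toList <+: (words[j]'(lt_of_lt_of_le hj hn)).toList → start ≤ (j : Int) ∧ (j : Int) ≤ e) →
    (needLoop word words fuel start e = true ↔
      ∃ j : Nat, ∃ hj : j < N.toNat, word.toList <+: (words[j]'(lt_of_lt_of_le hj hn)).toList) := by
  have hsle : ∀ {i j : Nat} (hij : i ≤ j) (hj : j < N.toNat),
      words[i]'(lt_of_lt_of_le (lt_of_le_of_lt hij hj) hn) ≤ words[j]'(lt_of_lt_of_le hj hn) := by
    intro i j hij hj
    have hlen : (words.take N.toNat).length = N.toNat := by simp; omega
    have := pvSorted_le hs (i := i) (j := j) hij (by omega)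
    simpa [List.getElem_take] using this
  intro fuel
  induction fuel with
  | zero => intro start e _ _ h3 _; omega
  | succ f ih =>
    intro start e h0 hen h3 hinv
    simp only [needLoop]
    by_cases hse : start ≤ e
    · simp only [if_pos hse]
      have hb := PySem.Int.floordiv_two_mid_bounds hse
      set mid := PySem.Int.floordiv (start + e) 2 with hmid
      have h0m : 0 ≤ mid := le_trans h0 hb.1
      have hmn : mid < (N.toNat : Int) := lt_of_le_of_lt hb.2 hen
      have hmlen : mid < (words.length : Int) := by
        have : (N.toNat : Int) ≤ (words.length : Int) := by exact_mod_cast hn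
        omega
      rw [PySem.List.pyGet?_eq_some_getElem words h0m hmlen]
      set m := mid.toNat with hm
      have hmn' : m < N.toNat := by omega
      have hmlen' : m < words.length := lt_of_lt_of_le hmn' hn
      set mw := words[m]'hmlen' with hmw
      by_cases hlt : word < mw
      · simp only [if_pos hlt]
        cases hscan : pvInnerScan word.toList mw.toList with
        | none =>
          simp only [true_iff]
          refine ⟨m, hmn', ?_⟩
          rcases pvInnerScan_none _ _ hscan with h | h
          · exact h
          · exact absurd (String.lt_iff_toList_lt.mp hlt) (not_lt.mpr (pvPrefix_le h))
        | some b =>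
          obtain ⟨u, a, e', c, d, hw, hmwl, hne, hbval⟩ := pvInnerScan_some _ _ b hscan
          cases b with
          | true =>
            have hcd : c < d := by
              rcases lt_or_gt_of_ne hne with h | h
              · exact h
              · simp [not_lt_of_gt h] at hbval
            refine ih start (mid - 1) h0 (by omega) (by omega) ?_
            intro j hj hp
            obtain ⟨hj1, hj2⟩ := hinv j hj hp
            refine ⟨hj1, ?_⟩
            by_contra hgt
            have hmj : m ≤ j := by omega
            have hle : mw ≤ words[j]'(lt_of_lt_of_le hj hn) := hsle hmj hj
            obtain ⟨r, hr⟩ := hp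
            have hlt2 : (words[j]'(lt_of_lt_of_le hj hn)).toList < mw.toList := by
              rw [← hr, hw, hmwl]
              simpa using pvLex_firstdiff u (a ++ r) e' hcd
            exact absurd (String.le_iff_toList_le.mp hle) (not_le.mpr hlt2)
          | false =>
            have hdc : d < c := by
              rcases lt_or_gt_of_ne hne with h | h
              · simp [h] at hbval
              · exact h
            have hlt2 : mw.toList < word.toList := by
              rw [hw, hmwl]; exact pvLex_firstdiff u e' a hdc
            exact absurd (String.lt_iff_toList_lt.mp hlt) (asymm hlt2)
      · simp only [if_neg hlt]
        by_cases hgt : mw < word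
        · simp only [if_pos hgt]
          refine ih (mid + 1) e (by omega) hen (by omega) ?_
          intro j hj hp
          obtain ⟨hj1, hj2⟩ := hinv j hj hp
          refine ⟨?_, hj2⟩
          by_contra hlt'
          have hjm : j ≤ m := by omega
          have h1 : words[j]'(lt_of_lt_of_le hj hn) ≤ mw := hsle hjm hmn'
          have h2 : word ≤ words[j]'(lt_of_lt_of_le hj hn) :=
            String.le_iff_toList_le.mpr (pvPrefix_le hp)
          exact absurd (lt_of_le_of_lt (le_trans h2 h1) hgt) (lt_irrefl _)
        · simp only [if_neg hgt, true_iff]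
          have heq : word = mw := le_antisymm (not_lt.mp hgt) (not_lt.mp hlt)
          exact ⟨m, hmn', heq ▸ List.prefix_refl _⟩
    · simp only [if_neg hse]
      constructor
      · intro h; exact absurd h (by simp)
      · rintro ⟨j, hj, hp⟩
        obtain ⟨h1, h2⟩ := hinv j hj hp
        omega

-- B's linear scan over any list of valid indices computes the same existence predicate
theorem pvAltLoop_iff (word : String) (words : List String) :
    ∀ l : List Int, (∀ i ∈ l, 0 ≤ i ∧ i < (words.length : Int)) →
    (altLoop word words l = true ↔
      ∃ i ∈ l, ∃ h : i.toNat < words.length,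
        word.toList <+: (words[i.toNat]'h).toList) := by
  intro l
  induction l with
  | nil => intro _; simp [altLoop]
  | cons i rest ih =>
    intro hvalid
    obtain ⟨h0, hlen⟩ := hvalid i (List.mem_cons_self)
    have hnat : i.toNat < words.length := by omega
    simp only [altLoop]
    rw [PySem.List.pyGet?_eq_some_getElem words h0 hlen]
    by_cases hsw : PySem.Str.startswith (words[i.toNat]'hnat) word = true
    · simp only [hsw, if_true, true_iff]
      exact ⟨i, List.mem_cons_self, hnat, by
        simpa using (PySem.Chars.startswith_iff _ _).mp (by simpa using hsw)⟩
    · simp only [hsw, Bool.false_eq_true, if_false]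
      rw [ih (fun j hj => hvalid j (List.mem_cons_of_mem _ hj))]
      constructor
      · rintro ⟨j, hj, h, hp⟩; exact ⟨j, List.mem_cons_of_mem _ hj, h, hp⟩
      · rintro ⟨j, hj, h, hp⟩
        rcases List.mem_cons.mp hj with rfl | hj'
        · exact absurd ((PySem.Chars.startswith_iff _ _).mpr (by simpa using hp))
            (by simpa using hsw)
        · exact ⟨j, hj', h, hp⟩

-- B equals "some word among the first N has `word` as a prefix"
theorem pvAltSpec (word : String) (words : List String) (N : Int)
    (hn : N.toNat ≤ words.length) (hNlen : N ≤ (words.length : Int)) :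
    (need_increase_alt word words N = true ↔
      ∃ j : Nat, ∃ hj : j < N.toNat, word.toList <+: (words[j]'(lt_of_lt_of_le hj hn)).toList) := by
  rw [show need_increase_alt word words N
      = altLoop word words (PySem.List.pyRange 0 N 1) from rfl]
  rw [pvAltLoop_iff word words (PySem.List.pyRange 0 N 1) (by
    intro i hi
    rw [PySem.List.mem_pyRange_one] at hi
    omega)]
  constructor
  · rintro ⟨i, hi, h, hp⟩
    rw [PySem.List.mem_pyRange_one] at hi
    exact ⟨i.toNat, by omega, hp⟩
  · rintro ⟨j, hj, hp⟩
    refine ⟨(j : Int), PySem.List.mem_pyRange_one.mpr ⟨by omega, by omega⟩, by simpa using lt_of_lt_of_le hj hn, by simpa using hp⟩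

-- ===== VERDICT (by name: the statement is the Claim_ definition above) =====
theorem need_increase_spec : Claim_equal_need_increase := by
  intro word words N _ hpre
  obtain ⟨hNlen, hs0⟩ := hpre
  have hs : (words.take N.toNat).Pairwise (· ≤ ·) :=
    hs0.imp (fun h => String.le_iff_toList_le.mpr h)
  have hn : N.toNat ≤ words.length := by omega
  show need_increase word words N = need_increase_alt word words N
  rw [Bool.eq_iff_iff]
  rw [show need_increase word words N = needLoop word words (N.toNat + 1) 0 (N - 1) from rfl]
  rw [pvLoopA word words N hn hs (N.toNat + 1) 0 (N - 1) (le_refl 0) (by omega) (by omega)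
    (fun j hj _ => by constructor <;> [exact Int.natCast_nonneg j; omega])]
  exact (pvAltSpec word words N hn hNlen).symm
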